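-- pv_equiv track=rewrite | github.com/SSSavii/GraphAnalyst | Analyst.py | find_same_glyph_sets
-- ===== SOURCE A (Python) =====
-- def find_same_glyph_sets(glyph_data):
--     """
--         Находит символы с одинаковыми наборами графем.
--
--         :param glyph_data: Словарь с данными о графемах
--         :return: Отсортированный список словарей с информацией о наборах
--         графем и символах, где они встречаются
--         """
--     same_glyph_sets = {}
--     for unicode, glyphs in glyph_data.items():
--         sorted_glyphs = tuple(sorted(glyphs))
--         if sorted_glyphs in same_glyph_sets:
--             same_glyph_sets[sorted_glyphs].append(unicode)
--         else:
--             same_glyph_sets[sorted_glyphs] = [unicode]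
--     result_list = [{"Набор графем": glyphs, "Unicodes": unicodes} for glyphs, unicodes in same_glyph_sets.items() if
--                    len(unicodes) >= 2]
--     return sorted(result_list, key=lambda x: x["Набор графем"])
-- ===== SOURCE B (Python) =====
-- def find_same_glyph_sets(glyph_data):
--     keys = sorted({tuple(sorted(glyphs)) for glyphs in glyph_data.values()})
--     result = []
--     for key in keys:
--         unicodes = [u for u, g in glyph_data.items() if tuple(sorted(g)) == key]
--         if len(unicodes) >= 2:
--             result.append({"Набор графем": key, "Unicodes": unicodes})
--     return result
-- ===== Notes on version B (the rewrite author's own statement) =====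
-- stated objective: alternative
-- what changed: Replaces A's dict-of-lists accumulation followed by a final sort of the result dicts with a sort of the distinct glyph-set keys up front, gathering each key's unicodes by a direct scan of the items, so no grouping dict and no final sort of dicts is needed.
import Mathlib
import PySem

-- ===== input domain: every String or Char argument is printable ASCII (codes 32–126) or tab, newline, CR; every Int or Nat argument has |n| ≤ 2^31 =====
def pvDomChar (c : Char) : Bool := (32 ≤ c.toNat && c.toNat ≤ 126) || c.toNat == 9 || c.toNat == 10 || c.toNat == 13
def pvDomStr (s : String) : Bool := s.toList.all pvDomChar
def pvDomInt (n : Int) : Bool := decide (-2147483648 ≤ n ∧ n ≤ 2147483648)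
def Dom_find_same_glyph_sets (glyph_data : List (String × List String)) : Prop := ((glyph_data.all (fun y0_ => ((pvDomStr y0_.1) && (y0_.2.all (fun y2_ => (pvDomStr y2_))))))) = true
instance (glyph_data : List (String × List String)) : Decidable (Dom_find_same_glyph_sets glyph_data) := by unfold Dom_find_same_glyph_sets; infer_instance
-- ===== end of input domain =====

-- B replaces A's dict-of-lists grouping + final sort of the result dicts by sorting the
-- distinct glyph-set keys first and gathering each key's unicodes with a direct scan
-- (objective: alternative decomposition, same results).

-- ===== PORT A =====
-- a result dict {"Набор графем": …, "Unicodes": …} is an association list; x["Набор графем"]: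
def pvKeyOf (x : List (String × List String)) : List String :=
  (PySem.Dict.mk x).getD "Набор графем" []

def find_same_glyph_sets (glyph_data : List (String × List String)) : List (List (String × List String)) :=
  let same_glyph_sets : PySem.Dict (List String) (List String) :=
    (PySem.Dict.ofList glyph_data).items.foldl
      (fun same p =>
        let sorted_glyphs := PySem.List.sorted p.2 (fun g => g) false
        if same.contains sorted_glyphs then
          same.modify sorted_glyphs [] (fun us => us ++ [p.1])
        else
          same.insert sorted_glyphs [p.1])
      PySem.Dict.empty
  let result_list :=
    (same_glyph_sets.items.filter (fun q => decide (2 ≤ q.2.length))).map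
      (fun q => [("Набор графем", q.1), ("Unicodes", q.2)])
  PySem.List.sorted result_list (fun x => pvKeyOf x) false

-- ===== PORT B =====
def find_same_glyph_sets_alt (glyph_data : List (String × List String)) : List (List (String × List String)) :=
  let items := (PySem.Dict.ofList glyph_data).items
  let keys : List (List String) :=
    PySem.List.sorted
      (PySem.Set.ofList (items.map (fun p => PySem.List.sorted p.2 (fun g => g) false)))
      (fun k => k) false
  keys.foldl
    (fun result k =>
      let unicodes :=
        (items.filter (fun p => PySem.List.sorted p.2 (fun g => g) false == k)).map (fun p => p.1)
      if decide (2 ≤ unicodes.length) then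
        result ++ [[("Набор графем", k), ("Unicodes", unicodes)]]
      else result)
    []

-- ===== PRECONDITION & SPEC =====
def Spec_find_same_glyph_sets (glyph_data : List (String × List String)) (out : List (List (String × List String))) : Prop := out = find_same_glyph_sets_alt glyph_data
instance (glyph_data : List (String × List String)) (out : List (List (String × List String))) : Decidable (Spec_find_same_glyph_sets glyph_data out) := by unfold Spec_find_same_glyph_sets; infer_instance

-- ===== CLAIM (what is proved, stated in full; the proofs are below) =====
def Claim_equal_find_same_glyph_sets : Prop := ∀ (glyph_data : List (String × List String)), Dom_find_same_glyph_sets glyph_data → Spec_find_same_glyph_sets glyph_data (find_same_glyph_sets glyph_data)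

-- ===== LEMMAS AND PROOFS =====

-- the glyph-set key of one input item
def pvK (p : String × List String) : List String := PySem.List.sorted p.2 (fun g => g) false

-- the unicodes gathered for one key
def pvUs (ps : List (String × List String)) (k : List String) : List String :=
  (ps.filter (fun p => pvK p == k)).map (fun p => p.1)

-- A's grouping dict, in canonical modify form
def pvG (ps : List (String × List String)) : PySem.Dict (List String) (List String) :=
  ps.foldl (fun d p => d.modify (pvK p) [] (fun us => us ++ [p.1])) PySem.Dict.empty

theorem pvG_keys (ps : List (String × List String)) :
    (pvG ps).keys = PySem.Set.ofList (ps.map pvK) := by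
  unfold pvG
  rw [PySem.Dict.keys_foldl_modify_key ps pvK [] (fun d x us => us ++ [x.1])]
  simp [PySem.Set.update_nil_left]

theorem pvG_keys_nodup (ps : List (String × List String)) : (pvG ps).keys.Nodup := by
  unfold pvG
  exact PySem.Dict.nodup_keys_foldl_modify_key ps pvK [] (fun d x us => us ++ [x.1]) _ (by simp)

theorem pvG_getD (ps : List (String × List String)) (k : List String) :
    (pvG ps).getD k [] = pvUs ps k := by
  unfold pvG
  have hmap : ps.foldl (fun d p => d.modify (pvK p) [] (fun us => us ++ [p.1])) PySem.Dict.empty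
      = (ps.map (fun p => (pvK p, p.1))).foldl
          (fun d q => d.modify q.1 [] (fun us => us ++ [q.2])) PySem.Dict.empty := by
    rw [List.foldl_map]
  rw [hmap, PySem.Dict.getD_foldl_modify_append]
  simp only [pvUs, List.filter_map, PySem.Dict.getD_empty, List.nil_append, List.map_map]
  rfl

theorem pvG_items (ps : List (String × List String)) :
    (pvG ps).items
      = (PySem.Set.ofList (ps.map pvK)).map (fun k => (k, pvUs ps k)) := by
  rw [PySem.Dict.items_eq_map_keys (pvG ps) (pvG_keys_nodup ps) [], pvG_keys ps]
  exact List.map_congr_left (fun k _ => by rw [pvG_getD])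

-- A's loop step is exactly a 'modify' step
theorem pvStep_eq_modify (d : PySem.Dict (List String) (List String)) (p : String × List String) :
    (if d.contains (pvK p) then d.modify (pvK p) [] (fun us => us ++ [p.1])
     else d.insert (pvK p) [p.1])
    = d.modify (pvK p) [] (fun us => us ++ [p.1]) := by
  by_cases h : d.contains (pvK p) = true
  · simp [h]
  · simp only [Bool.not_eq_true] at h
    simp [h, PySem.Dict.modify, PySem.Dict.getD_of_not_contains (h := h)]

theorem pvKeyOf_pair (k us : List String) :
    pvKeyOf [("Набор графем", k), ("Unicodes", us)] = k := by
  simp [pvKeyOf, PySem.Dict.getD_eq_get?_getD, PySem.Dict.get?_mk_cons]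

theorem pvInstBridge {A : Type} (xs : List A) (key : A → List String) (rev : Bool) :
    @PySem.List.sorted A (List String) List.instLT (fun a b => a.decidableLT b) xs key rev
    = @PySem.List.sorted A (List String) List.instLinearOrder.toLT LinearOrder.toDecidableLT xs key rev := by
  congr 1

theorem pvSortedEq {A : Type} (xs ys : List A) (key : A → List String)
    (h1 : ys.Perm xs) (h2 : List.Pairwise (fun a b => key a < key b) ys) :
    PySem.List.sorted xs key false = ys := by
  rw [pvInstBridge]
  exact PySem.List.sorted_eq_of_perm_of_pairwise_lt xs ys key h1 h2

theorem pvSortedSetPairwise (xs : List (List String)) :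
    List.Pairwise (fun a b => a < b)
      (PySem.List.sorted (PySem.Set.ofList xs) (fun k => k) false) := by
  rw [pvInstBridge]
  exact PySem.List.sorted_ofList_pairwise_lt xs

theorem pvSortedSetPerm {A : Type} (xs : List A) (key : A → List String) (rev : Bool) :
    (PySem.List.sorted xs key rev).Perm xs :=
  PySem.List.sorted_perm xs key rev

-- ===== VERDICT (by name: the statement is the Claim_ definition above) =====
theorem find_same_glyph_sets_spec : Claim_equal_find_same_glyph_sets := by
  intro glyph_data _
  unfold Spec_find_same_glyph_sets find_same_glyph_sets find_same_glyph_sets_alt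
  dsimp only
  generalize (PySem.Dict.ofList glyph_data).items = ps
  have hA : ps.foldl
      (fun same p =>
        if same.contains (PySem.List.sorted p.2 (fun g => g) false) then
          same.modify (PySem.List.sorted p.2 (fun g => g) false) [] (fun us => us ++ [p.1])
        else same.insert (PySem.List.sorted p.2 (fun g => g) false) [p.1])
      PySem.Dict.empty = pvG ps := by
    unfold pvG
    congr 1
    funext d p
    exact pvStep_eq_modify d p
  rw [hA, pvG_items, List.filter_map, List.map_map, PySem.List.foldl_append_if, List.nil_append]
  refine pvSortedEq _ _ _ (((pvSortedSetPerm _ _ _).filter _).map _) ?_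
  rw [List.pairwise_map]
  have hp : List.Pairwise (fun a b => a < b)
      (List.filter
        (fun k => decide (2 ≤ (List.map (fun p => p.1) (List.filter (fun p => pvK p == k) ps)).length))
        (PySem.List.sorted (PySem.Set.ofList (List.map pvK ps)) (fun k => k) false)) :=
    (pvSortedSetPairwise _).filter _
  exact hp.imp (fun {a b} h => by simpa [pvKeyOf_pair, pvUs] using h)
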